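-- pv_equiv track=rewrite | github.com/Meteor-Sage/Artifact-for-replication | cryptosence/extract_graph.py | find_references_union
-- ===== SOURCE A (Python) =====
-- from collections import defaultdict
--
-- def normalize_label(label):
--     if label.startswith('_'):
--         return normalize_label(label[1:])
--     if '@' in label:
--         label = label.split('@', 1)[0]
--     return label
--
-- def find_references_union(labels, edges):
--     reverse_adjacency = defaultdict(set)
--     for src, tgt in edges:
--         normalized_src = normalize_label(src)
--         normalized_tgt = normalize_label(tgt)
--         reverse_adjacency[normalized_tgt].add(normalized_src)
--
--     visited_nodes = set()
--     visited_edges = set()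
--     stack = [normalize_label(label) for label in labels]
--
--     while stack:
--         current_label = stack.pop()
--         if current_label in visited_nodes:
--             continue
--         visited_nodes.add(current_label)
--         for predecessor in reverse_adjacency[current_label]:
--             visited_edges.add((predecessor, current_label))
--             if predecessor not in visited_nodes:
--                 stack.append(predecessor)
--
--     return visited_nodes, visited_edges
-- ===== SOURCE B (Python) =====
-- def normalize_label(label):
--     if label.startswith('_'):
--         return normalize_label(label[1:])
--     if '@' in label:
--         label = label.split('@', 1)[0]
--     return label
--
-- def find_references_union(labels, edges):
--     # One normalization pass: first-occurrence dedup of the normalized edge list.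
--     # No adjacency index is ever built.
--     nedges = list(dict.fromkeys((normalize_label(s), normalize_label(t)) for s, t in edges))
--
--     # Reachability by scanning the flat edge list for predecessors of each
--     # newly reached node (index-free traversal).
--     visited = {}
--     stack = [normalize_label(l) for l in labels]
--     while stack:
--         cur = stack.pop()
--         if cur in visited:
--             continue
--         visited[cur] = True
--         stack += [s for s, t in nedges if t == cur and s not in visited]
--
--     # The edge set is derived afterwards: every normalized edge whose target was reached.
--     refs = {(s, v) for v in visited for s, t in nedges if t == v}
--     return set(visited), refs
-- ===== Notes on version B (the rewrite author's own statement) =====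
-- stated objective: alternative
-- what changed: B builds no reverse-adjacency map at all: it normalizes and first-occurrence-dedups the edge list once, runs the reachability traversal by scanning that flat edge list for the predecessors of each newly reached node, and derives the edge set afterwards as one comprehension over the reached nodes; it trades A's adjacency index for repeated scans of the edge list.
import Mathlib
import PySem

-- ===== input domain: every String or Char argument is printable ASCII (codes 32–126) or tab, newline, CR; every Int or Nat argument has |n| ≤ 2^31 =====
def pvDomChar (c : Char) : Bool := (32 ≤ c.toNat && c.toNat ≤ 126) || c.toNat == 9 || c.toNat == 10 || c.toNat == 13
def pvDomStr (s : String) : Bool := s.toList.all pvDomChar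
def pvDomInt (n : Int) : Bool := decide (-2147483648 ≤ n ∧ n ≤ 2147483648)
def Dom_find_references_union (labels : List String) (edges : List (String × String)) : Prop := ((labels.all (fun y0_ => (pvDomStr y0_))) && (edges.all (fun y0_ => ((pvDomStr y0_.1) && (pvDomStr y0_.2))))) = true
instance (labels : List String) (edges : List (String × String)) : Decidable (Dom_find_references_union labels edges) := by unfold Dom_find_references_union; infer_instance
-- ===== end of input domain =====

-- B drops A's reverse-adjacency map: it dedups the normalized edge list once, finds predecessors
-- by scanning that flat list during the traversal, and derives the edge set afterwards
-- ("alternative": index-free, trades A's adjacency index for repeated edge-list scans).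


-- shared helper (identical lines in Source A and Source B): normalize_label, ported by hand on List Char
-- (exact on the stated ASCII domain: startswith/'@' in/split('@',1)[0] via PySem.Chars)
def pvNormChars : List Char → List Char
  | [] => []
  | c :: rest =>
    if c = '_' then pvNormChars rest            -- label.startswith('_') → recurse on label[1:]
    else if PySem.Chars.isIn ['@'] (c :: rest)  -- '@' in label
    then ((PySem.Chars.splitMax? (c :: rest) ['@'] 1).getD []).headD []  -- label.split('@',1)[0]
    else c :: rest

def normalize_label (label : String) : String := String.ofList (pvNormChars label.toList)

-- ===== PORT A =====
-- A's while-loop; fuel = labels.length + edges.length always suffices (each iteration pops one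
-- element, and at most one element per seed plus one per reverse-adjacency entry is ever pushed)
def pvLoopA (radj : PySem.Dict String (PySem.Set String)) :
    Nat → PySem.Set String → PySem.Set (String × String) → List String →
    PySem.Set String × PySem.Set (String × String)
  | 0, vn, ve, _ => (vn, ve)
  | f + 1, vn, ve, stack =>
    match PySem.List.pop? stack (-1) with
    | none => (vn, ve)                                   -- 'while stack:' exits
    | some (cur, rest) =>
      if PySem.Set.contains vn cur then pvLoopA radj f vn ve rest
      else
        let vn' := PySem.Set.add vn cur
        let p := (radj.getD cur PySem.Set.empty).foldl
          (fun (p : PySem.Set (String × String) × List String) pred =>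
            (PySem.Set.add p.1 (pred, cur),
             if PySem.Set.contains vn' pred then p.2 else p.2 ++ [pred]))
          (ve, rest)
        pvLoopA radj f vn' p.1 p.2

def find_references_union (labels : List String) (edges : List (String × String)) : List String × (List (String × String)) :=
  let radj : PySem.Dict String (PySem.Set String) :=
    edges.foldl (fun d e =>
      let ns := normalize_label e.1
      let nt := normalize_label e.2
      d.insert nt (PySem.Set.add (d.getD nt PySem.Set.empty) ns)) PySem.Dict.empty
  let stack := labels.map (fun label => normalize_label label)
  pvLoopA radj (labels.length + edges.length) PySem.Set.empty PySem.Set.empty stack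

-- ===== PORT B =====
-- list(dict.fromkeys(normalized edges)) — first-occurrence dedup of the normalized edge list
def pvNormEdges (edges : List (String × String)) : List (String × String) :=
  PySem.List.dedup (edges.map (fun e => (normalize_label e.1, normalize_label e.2)))

-- B's while-loop: visited dict only; predecessors found by scanning the flat edge list
-- (same fuel bound as A: one pop per iteration, ≤ one push per seed plus one per dedup'd edge)
def pvLoopBscan (nedges : List (String × String)) :
    Nat → PySem.Dict String Bool → List String → PySem.Dict String Bool
  | 0, vd, _ => vd
  | f + 1, vd, stack =>
    match PySem.List.pop? stack (-1) with
    | none => vd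
    | some (cur, rest) =>
      if vd.contains cur then pvLoopBscan nedges f vd rest
      else
        let vd' := vd.insert cur true
        pvLoopBscan nedges f vd'
          (rest ++ (nedges.filter (fun e => e.2 == cur && !(vd'.contains e.1))).map (fun e => e.1))

def find_references_union_alt (labels : List String) (edges : List (String × String)) : List String × (List (String × String)) :=
  let nedges := pvNormEdges edges
  let visited := pvLoopBscan nedges (labels.length + edges.length) PySem.Dict.empty
    (labels.map (fun l => normalize_label l))
  (PySem.Set.ofList visited.keys,
   PySem.Set.ofList (visited.keys.flatMap (fun v =>
     (nedges.filter (fun e => e.2 == v)).map (fun e => (e.1, v)))))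

-- ===== PRECONDITION & SPEC =====
def Spec_find_references_union (labels : List String) (edges : List (String × String)) (out : List String × (List (String × String))) : Prop := out = find_references_union_alt labels edges
instance (labels : List String) (edges : List (String × String)) (out : List String × (List (String × String))) : Decidable (Spec_find_references_union labels edges out) := by unfold Spec_find_references_union; infer_instance

-- ===== CLAIM (what is proved, stated in full; the proofs are below) =====
def Claim_equal_find_references_union : Prop := ∀ (labels : List String) (edges : List (String × String)), Dom_find_references_union labels edges → Spec_find_references_union labels edges (find_references_union labels edges)

-- ===== LEMMAS AND PROOFS =====

-- A's reverse-adjacency fold, named for the proofs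
def pvRadj (edges : List (String × String)) : PySem.Dict String (PySem.Set String) :=
  edges.foldl (fun d e =>
    let ns := normalize_label e.1
    let nt := normalize_label e.2
    d.insert nt (PySem.Set.add (d.getD nt PySem.Set.empty) ns)) PySem.Dict.empty

-- the edge list A has accumulated after having visited exactly the nodes vs, in that order
def pvEdgesOf (radj : PySem.Dict String (PySem.Set String)) (vs : List String) : List (String × String) :=
  vs.flatMap (fun v => (radj.getD v []).map (fun p => (p, v)))

-- central correspondence: A's bucket for any target = srcs of the dedup'd normalized edges with that target
theorem pvMemBucket (L : List (String × String)) (ns nt : String) :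
    ns ∈ (L.filter (fun e => e.2 == nt)).map (fun e => e.1) ↔ (ns, nt) ∈ L := by
  simp only [List.mem_map, List.mem_filter, beq_iff_eq]
  constructor
  · rintro ⟨e, ⟨he, h2⟩, h1⟩
    have : e = (ns, nt) := by cases e; simp_all
    exact this ▸ he
  · intro h; exact ⟨(ns, nt), ⟨h, rfl⟩, rfl⟩

theorem pvBucket_eq_aux (edges : List (String × String)) :
    ∀ (d : PySem.Dict String (PySem.Set String)) (L : List (String × String)),
    (∀ c, d.getD c PySem.Set.empty = (L.filter (fun e => e.2 == c)).map (fun e => e.1)) →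
    ∀ c, ((edges.foldl (fun d e =>
        d.insert (normalize_label e.2)
          (PySem.Set.add (d.getD (normalize_label e.2) PySem.Set.empty) (normalize_label e.1))) d).getD c PySem.Set.empty)
      = (((edges.foldl (fun L e => PySem.Set.add L (normalize_label e.1, normalize_label e.2)) L).filter
          (fun e => e.2 == c)).map (fun e => e.1)) := by
  induction edges with
  | nil => intro d L h c; exact h c
  | cons e rest ih =>
    intro d L h c
    simp only [List.foldl_cons]
    apply ih
    intro c'
    by_cases hm : (normalize_label e.1, normalize_label e.2) ∈ L
    · rw [PySem.Set.add_of_mem hm, PySem.Dict.getD_insert]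
      split
      · subst c'
        rw [h (normalize_label e.2), PySem.Set.add_of_mem ((pvMemBucket L _ _).mpr hm)]
      · exact h c'
    · rw [PySem.Set.add_of_not_mem hm, PySem.Dict.getD_insert, List.filter_append, List.map_append]
      split
      · subst c'
        rw [h (normalize_label e.2),
          PySem.Set.add_of_not_mem (fun hmem => hm ((pvMemBucket L _ _).mp hmem))]
        simp
      · rename_i hne
        have : ((normalize_label e.1, normalize_label e.2).2 == c') = false := by
          simp only [beq_eq_false_iff_ne]; exact fun hh => hne hh.symm
        simp [List.filter, this]
        exact h c'

theorem pvNormEdges_eq_foldl (edges : List (String × String)) :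
    pvNormEdges edges
      = edges.foldl (fun L e => PySem.Set.add L (normalize_label e.1, normalize_label e.2)) [] := by
  rw [pvNormEdges, PySem.List.dedup_eq_ofList, PySem.Set.ofList_eq_foldl, List.foldl_map]

theorem pvBucket_eq (edges : List (String × String)) (c : String) :
    (pvRadj edges).getD c PySem.Set.empty
      = ((pvNormEdges edges).filter (fun e => e.2 == c)).map (fun e => e.1) := by
  rw [pvNormEdges_eq_foldl]
  exact pvBucket_eq_aux edges PySem.Dict.empty [] (fun c => by simp) c

theorem pvFilterMapFilter (nedges : List (String × String)) (cur : String) (q : String → Bool) :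
    ((nedges.filter (fun e => e.2 == cur)).map (fun e => e.1)).filter (fun s => !q s)
      = (nedges.filter (fun e => e.2 == cur && !(q e.1))).map (fun e => e.1) := by
  induction nedges with
  | nil => rfl
  | cons e rest ih =>
    by_cases h2 : (e.2 == cur) = true
    · by_cases h1 : q e.1 <;> simp [h2, h1, ih]
    · simp only [Bool.not_eq_true] at h2
      simp [h2, ih]

theorem pvBuckets_nodup (edges : List (String × String)) :
    ∀ (d : PySem.Dict String (PySem.Set String)), (∀ t, (d.getD t []).Nodup) →
    ∀ t, ((edges.foldl (fun d e =>
      let ns := normalize_label e.1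
      let nt := normalize_label e.2
      d.insert nt (PySem.Set.add (d.getD nt PySem.Set.empty) ns)) d).getD t []).Nodup := by
  induction edges with
  | nil => intro d hd t; simpa using hd t
  | cons e rest ih =>
    intro d hd t
    simp only [List.foldl_cons]
    apply ih
    intro u
    rw [PySem.Dict.getD_insert]
    split
    · exact PySem.Set.nodup_add _ _ (hd _)
    · exact hd u

theorem pvMem_edgesOf_snd (radj : PySem.Dict String (PySem.Set String)) (vs : List String)
    (x : String × String) (hx : x ∈ pvEdgesOf radj vs) : x.2 ∈ vs := by
  simp only [pvEdgesOf, List.mem_flatMap, List.mem_map] at hx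
  obtain ⟨v, hv, p, hp, rfl⟩ := hx
  exact hv

theorem pvEdgesOf_nodup (radj : PySem.Dict String (PySem.Set String))
    (hb : ∀ t, (radj.getD t []).Nodup) (vs : List String) (hvs : vs.Nodup) :
    (pvEdgesOf radj vs).Nodup := by
  unfold pvEdgesOf
  induction vs with
  | nil => simp
  | cons v rest ih =>
    simp only [List.flatMap_cons]
    rw [List.nodup_append]
    refine ⟨?_, ih (hvs.of_cons), ?_⟩
    · exact (hb v).map (fun a b h => by simpa using h)
    · intro a ha b hbm heq
      subst heq
      have h2 : a.2 ∈ rest := pvMem_edgesOf_snd radj rest a hbm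
      simp only [List.mem_map] at ha
      obtain ⟨p, _, rfl⟩ := ha
      exact (List.nodup_cons.mp hvs).1 h2

theorem pvContains_bridge (vd : PySem.Dict String Bool) (x : String) :
    PySem.Set.contains vd.keys x = vd.contains x := by
  by_cases hx : x ∈ vd.keys <;>
    simp [PySem.Dict.contains_eq_decide_mem_keys, hx]

-- a loop appending the elements that FAIL a test is an append of a filter
theorem pvFoldl_append_ifnot {α : Type} (c : α → Bool) (l : List α) (a : List α) :
    l.foldl (fun acc x => if c x then acc else acc ++ [x]) a = a ++ l.filter (fun x => !c x) := by
  induction l generalizing a with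
  | nil => simp
  | cons x xs ih =>
    by_cases hx : c x <;> simp [hx, ih, List.append_assoc]

-- the heart of the proof: with the same fuel and the same stack, A's loop returns B's visited
-- keys together with exactly the edges B later derives from them, and those keys stay nodup
theorem pvLoop_eq (radj : PySem.Dict String (PySem.Set String)) (nedges : List (String × String))
    (hbe : ∀ c, radj.getD c PySem.Set.empty = (nedges.filter (fun e => e.2 == c)).map (fun e => e.1))
    (hb : ∀ t, (radj.getD t []).Nodup) :
    ∀ (f : Nat) (vd : PySem.Dict String Bool) (st : List String),
    vd.keys.Nodup →
    pvLoopA radj f vd.keys (pvEdgesOf radj vd.keys) st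
      = ((pvLoopBscan nedges f vd st).keys, pvEdgesOf radj (pvLoopBscan nedges f vd st).keys)
    ∧ (pvLoopBscan nedges f vd st).keys.Nodup := by
  intro f
  induction f with
  | zero => intro vd st hnd; exact ⟨rfl, hnd⟩
  | succ f ih =>
    intro vd st hnd
    cases hpop : PySem.List.pop? st (-1) with
    | none =>
      refine ⟨?_, ?_⟩
      · simp only [pvLoopA, pvLoopBscan, hpop]
      · simp only [pvLoopBscan, hpop]; exact hnd
    | some cr =>
      obtain ⟨cur, rest⟩ := cr
      simp only [pvLoopA, pvLoopBscan, hpop]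
      rw [pvContains_bridge]
      cases hvd : vd.contains cur with
      | true =>
        simp only [if_true]
        exact ih vd rest hnd
      | false =>
        simp only [Bool.false_eq_true, if_false]
        have hc : cur ∉ vd.keys := by
          have h2 := hvd
          rw [PySem.Dict.contains_eq_decide_mem_keys] at h2
          exact of_decide_eq_false h2
        have hkeys' : (vd.insert cur true).keys = vd.keys ++ [cur] :=
          PySem.Dict.keys_insert_of_not_contains _ _ hvd
        have hadd : PySem.Set.add vd.keys cur = vd.keys ++ [cur] :=
          PySem.Set.add_of_not_mem hc
        have hvn : PySem.Set.add vd.keys cur = (vd.insert cur true).keys :=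
          hadd.trans hkeys'.symm
        have hnd' : (vd.insert cur true).keys.Nodup := by
          rw [hkeys']
          refine List.Nodup.append hnd (List.nodup_singleton cur) ?_
          intro a ha hb'
          have : a = cur := by simpa using hb'
          exact hc (this ▸ ha)
        have hmapnd : ((radj.getD cur (PySem.Set.empty : PySem.Set String)).map
            (fun pred => (pred, cur))).Nodup :=
          (hb cur).map (fun a b h => by simpa using h)
        have hdisj : ∀ x ∈ (radj.getD cur (PySem.Set.empty : PySem.Set String)).map
            (fun pred => (pred, cur)), x ∉ pvEdgesOf radj vd.keys := by
          intro x hx hmem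
          have h2 := pvMem_edgesOf_snd radj _ x hmem
          simp only [List.mem_map] at hx
          obtain ⟨p, _, rfl⟩ := hx
          exact hc h2
        rw [PySem.List.foldl_prod_mk
          (f := fun a pred => PySem.Set.add a (pred, cur))
          (g := fun b pred => if PySem.Set.contains (PySem.Set.add vd.keys cur) pred then b
            else b ++ [pred])]
        rw [← PySem.Set.update_map_eq_foldl_add,
          PySem.Set.update_eq_append_of_disjoint _ _ hmapnd hdisj]
        have hE : pvEdgesOf radj vd.keys ++ (radj.getD cur (PySem.Set.empty : PySem.Set String)).map
            (fun pred => (pred, cur)) = pvEdgesOf radj ((vd.insert cur true).keys) := by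
          rw [hkeys']
          simp [pvEdgesOf]
        have hstack : (radj.getD cur (PySem.Set.empty : PySem.Set String)).foldl
            (fun b pred => if PySem.Set.contains ((vd.insert cur true).keys) pred then b
              else b ++ [pred]) rest
            = rest ++ (nedges.filter
                (fun e => e.2 == cur && !((vd.insert cur true).contains e.1))).map (fun e => e.1) := by
          rw [pvFoldl_append_ifnot]
          rw [hbe cur]
          have hcb : (fun p => !PySem.Set.contains ((vd.insert cur true).keys) p)
              = (fun p => !(vd.insert cur true).contains p) := by
            funext p; rw [pvContains_bridge]
          rw [hcb, pvFilterMapFilter]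
        rw [hvn, hE, hstack]
        exact ih (vd.insert cur true) _ hnd'

theorem pvPair_eq (ks : List String) (R : PySem.Dict String (PySem.Set String))
    (nedges : List (String × String))
    (hbe : ∀ c, R.getD c PySem.Set.empty = (nedges.filter (fun e => e.2 == c)).map (fun e => e.1))
    (h : ks.Nodup) (hR : ∀ t, (R.getD t []).Nodup) :
    (PySem.Set.ofList ks,
      PySem.Set.ofList (ks.flatMap (fun v => (nedges.filter (fun e => e.2 == v)).map (fun e => (e.1, v)))))
    = (ks, pvEdgesOf R ks) := by
  have hflat : ks.flatMap (fun v => (nedges.filter (fun e => e.2 == v)).map (fun e => (e.1, v)))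
      = pvEdgesOf R ks := by
    unfold pvEdgesOf
    refine List.flatMap_congr ?_
    intro v hv
    rw [show (R.getD v [] : List String) = R.getD v PySem.Set.empty from rfl, hbe v, List.map_map]
    rfl
  rw [hflat, PySem.Set.ofList_eq_self_of_nodup _ h,
    PySem.Set.ofList_eq_self_of_nodup _ (pvEdgesOf_nodup R hR ks h)]

-- ===== VERDICT (by name: the statement is the Claim_ definition above) =====
theorem find_references_union_spec : Claim_equal_find_references_union := by
  intro labels edges _
  unfold Spec_find_references_union
  have hbe := pvBucket_eq edges
  have hb : ∀ t, ((pvRadj edges).getD t []).Nodup :=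
    pvBuckets_nodup edges PySem.Dict.empty (fun t => by simp)
  obtain ⟨h1, h2⟩ := pvLoop_eq (pvRadj edges) (pvNormEdges edges) hbe hb
    (labels.length + edges.length) PySem.Dict.empty (labels.map (fun l => normalize_label l)) (by simp)
  calc find_references_union labels edges
      = pvLoopA (pvRadj edges) (labels.length + edges.length) PySem.Set.empty PySem.Set.empty
          (labels.map (fun l => normalize_label l)) := rfl
    _ = ((pvLoopBscan (pvNormEdges edges) (labels.length + edges.length) PySem.Dict.empty
          (labels.map (fun l => normalize_label l))).keys,
         pvEdgesOf (pvRadj edges) (pvLoopBscan (pvNormEdges edges) (labels.length + edges.length)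
          PySem.Dict.empty (labels.map (fun l => normalize_label l))).keys) := h1
    _ = find_references_union_alt labels edges := by
          rw [find_references_union_alt]
          exact (pvPair_eq _ (pvRadj edges) (pvNormEdges edges) hbe h2 hb).symm
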